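-- pv_equiv track=rewrite | github.com/JoanMarcMM/RA1-IntroduccioPython-JoanMarc | Practica_3.py | empleados_que_trabajan_en_todos_los_dias
-- ===== SOURCE A (Python) =====
-- from typing import Dict, Iterable, List, Set, Tuple
--
-- def empleados_que_trabajan_en_todos_los_dias(empleados_por_dia: Dict[str, Set[str]]) -> Set[str]:
--     conjuntos = list(empleados_por_dia.values())
--     if not conjuntos:
--         return set()
--     inter = conjuntos[0].copy()
--     for c in conjuntos[1:]:
--         inter &= c
--     return inter
-- ===== SOURCE B (Python) =====
-- def empleados_que_trabajan_en_todos_los_dias(empleados_por_dia):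
--     num_dias = len(empleados_por_dia)
--     counts = {}
--     for empleados in empleados_por_dia.values():
--         for e in empleados:
--             counts[e] = counts.get(e, 0) + 1
--     return {e for e, c in counts.items() if c == num_dias}
-- ===== Notes on version B (the rewrite author's own statement) =====
-- stated objective: alternative
-- what changed: B replaces the repeated set intersections with a single pass that counts, in a dict, in how many daily sets each employee appears, then keeps those whose count equals the number of days.
import Mathlib
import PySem

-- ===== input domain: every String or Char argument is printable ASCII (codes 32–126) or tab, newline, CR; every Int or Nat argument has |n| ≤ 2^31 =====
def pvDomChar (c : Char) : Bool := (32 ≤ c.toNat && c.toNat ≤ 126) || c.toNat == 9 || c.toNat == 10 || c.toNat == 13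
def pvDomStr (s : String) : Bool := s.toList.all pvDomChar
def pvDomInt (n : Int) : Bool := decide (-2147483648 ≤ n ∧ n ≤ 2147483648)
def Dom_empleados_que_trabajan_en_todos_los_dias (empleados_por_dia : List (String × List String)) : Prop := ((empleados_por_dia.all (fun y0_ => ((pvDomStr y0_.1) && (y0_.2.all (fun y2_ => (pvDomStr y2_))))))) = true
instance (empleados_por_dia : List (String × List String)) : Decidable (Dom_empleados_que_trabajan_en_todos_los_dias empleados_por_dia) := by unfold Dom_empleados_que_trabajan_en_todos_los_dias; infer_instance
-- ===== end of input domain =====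

-- B counts in one dict pass how many daily sets each employee appears in and keeps those whose
-- count equals the number of days, instead of A's chain of set intersections (alternative, same cost).


-- ===== PORT A =====
def empleados_que_trabajan_en_todos_los_dias (empleados_por_dia : List (String × List String)) : List String :=
  let conjuntos := empleados_por_dia.map Prod.snd
  match conjuntos with
  | [] => []
  | c0 :: rest => rest.foldl (fun inter c => PySem.Set.inter inter c) c0

-- ===== PORT B =====
def empleados_que_trabajan_en_todos_los_dias_alt (empleados_por_dia : List (String × List String)) : List String :=
  let num_dias : Int := empleados_por_dia.length
  let counts : PySem.Dict String Int :=
    empleados_por_dia.foldl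
      (fun cnts kv => kv.2.foldl (fun cnts e => cnts.insert e (cnts.getD e 0 + 1)) cnts)
      PySem.Dict.empty
  (counts.items.filter (fun p => p.2 == num_dias)).map Prod.fst

-- ===== PRECONDITION & SPEC =====
-- Pre_ only states the type-convention invariant of the input: each value list represents a
-- Python set, so it has no duplicate elements (every real input, a dict of sets, satisfies it).
def Pre_empleados_que_trabajan_en_todos_los_dias (empleados_por_dia : List (String × List String)) : Prop :=
  ∀ p ∈ empleados_por_dia, p.2.Nodup
instance (empleados_por_dia : List (String × List String)) : Decidable (Pre_empleados_que_trabajan_en_todos_los_dias empleados_por_dia) := by unfold Pre_empleados_que_trabajan_en_todos_los_dias; infer_instance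

def pvWitness_empleados_que_trabajan_en_todos_los_dias : (List (String × List String)) :=
  [("lunes", ["ana", "bob"]), ("martes", ["bob", "carla"])]

def Spec_empleados_que_trabajan_en_todos_los_dias (empleados_por_dia : List (String × List String)) (out : List String) : Prop := out = empleados_que_trabajan_en_todos_los_dias_alt empleados_por_dia
instance (empleados_por_dia : List (String × List String)) (out : List String) : Decidable (Spec_empleados_que_trabajan_en_todos_los_dias empleados_por_dia out) := by unfold Spec_empleados_que_trabajan_en_todos_los_dias; infer_instance

-- ===== CLAIM (what is proved, stated in full; the proofs are below) =====
def Claim_equal_empleados_que_trabajan_en_todos_los_dias : Prop := ∀ (empleados_por_dia : List (String × List String)), Dom_empleados_que_trabajan_en_todos_los_dias empleados_por_dia → Pre_empleados_que_trabajan_en_todos_los_dias empleados_por_dia → Spec_empleados_que_trabajan_en_todos_los_dias empleados_por_dia (empleados_que_trabajan_en_todos_los_dias empleados_por_dia)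

-- ===== LEMMAS AND PROOFS =====

-- A's intersection chain is a filter of the first set.
theorem pv_foldl_inter (rest : List (List String)) (acc : List String) :
    rest.foldl (fun inter c => PySem.Set.inter inter c) acc
      = acc.filter (fun x => rest.all (fun c => PySem.Set.contains c x)) := by
  induction rest generalizing acc with
  | nil => simp
  | cons c cs ih =>
      simp only [List.foldl_cons, ih]
      show (acc.filter (fun x => PySem.Set.contains c x)).filter _ = _
      rw [List.filter_filter]
      apply List.filter_congr
      intro x _
      simp [Bool.and_comm]

-- Filtering survivors of a foldl-add extension: elements satisfying P all lie in s already.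
theorem pv_filter_foldl_add (P : String → Bool) (b : List String) (s : PySem.Set String)
    (h : ∀ x, P x = true → x ∈ s) :
    ((b.foldl PySem.Set.add s).filter P) = s.filter P := by
  induction b generalizing s with
  | nil => rfl
  | cons x xs ih =>
      simp only [List.foldl_cons]
      rw [PySem.Set.add_eq_ite]
      by_cases hx : x ∈ s
      · simp only [if_pos hx]; exact ih s h
      · simp only [if_neg hx]
        rw [ih (s ++ [x]) (fun y hy => List.mem_append_left _ (h y hy))]
        have hPx : P x = false := by
          cases hPx : P x with
          | false => rfl
          | true => exact absurd (h x hPx) hx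
        simp [List.filter_append, hPx]

-- count in a flatten of nodup lists = number of lists containing the element
theorem pv_count_flatten (vs : List (List String)) (hnd : ∀ v ∈ vs, v.Nodup) (k : String) :
    vs.flatten.count k = vs.countP (fun v => decide (k ∈ v)) := by
  induction vs with
  | nil => rfl
  | cons v tl ih =>
      simp only [List.flatten_cons, List.count_append, List.countP_cons]
      rw [ih (fun w hw => hnd w (List.mem_cons_of_mem _ hw))]
      by_cases hk : k ∈ v
      · have h1 : v.count k = 1 := List.count_eq_one_of_mem (hnd v (List.mem_cons_self)) hk
        simp [h1, hk, Nat.add_comm]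
      · have h0 : v.count k = 0 := List.count_eq_zero_of_not_mem hk
        simp [h0, hk]

theorem empleados_main (d : List (String × List String))
    (hpre : ∀ p ∈ d, p.2.Nodup) :
    empleados_que_trabajan_en_todos_los_dias d = empleados_que_trabajan_en_todos_los_dias_alt d := by
  unfold empleados_que_trabajan_en_todos_los_dias empleados_que_trabajan_en_todos_los_dias_alt
  cases d with
  | nil => rfl
  | cons kv tl =>
      simp only [List.map_cons]
      have hvs : ∀ v ∈ (kv :: tl).map Prod.snd, v.Nodup := by
        intro v hv
        rcases List.mem_map.mp hv with ⟨p, hp, rfl⟩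
        exact hpre p hp
      set c0 := kv.2 with hc0
      set rest := tl.map Prod.snd with hrest
      have hc0nd : c0.Nodup := hvs c0 (by simp [hc0])
      -- B's counter dict equals Counter of the flattened value lists
      have hcounts :
          (kv :: tl).foldl
            (fun cnts kv => kv.2.foldl (fun cnts e => cnts.insert e (cnts.getD e 0 + 1)) cnts)
            PySem.Dict.empty
          = PySem.Dict.counter (((kv :: tl).map Prod.snd).flatten) := by
        rw [← PySem.Dict.foldl_insert_getD_add_one_eq_counter, List.foldl_flatten, List.foldl_map]
      simp only [hcounts]
      set F := ((kv :: tl).map Prod.snd).flatten with hF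
      set n : Int := ((kv :: tl).length : Int) with hn
      rw [PySem.Dict.items_counter]
      rw [List.filter_map, List.map_map]
      have hmapid :
          (Prod.fst ∘ fun k => (k, (F.count k : Int))) = id := by
        funext k; rfl
      rw [hmapid, List.map_id]
      -- the filter predicate after composition
      have hP : ((fun (p : String × Int) => p.2 == n) ∘ fun k => (k, (F.count k : Int)))
          = fun k => ((F.count k : Int) == n) := rfl
      rw [hP]
      set P : String → Bool := fun k => ((F.count k : Int) == n) with hPdef
      -- P k implies membership in every value list
      have hcount : ∀ k, F.count k = ((kv :: tl).map Prod.snd).countP (fun v => decide (k ∈ v)) :=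
        fun k => pv_count_flatten _ hvs k
      have hPiff : ∀ k, P k = true ↔ ∀ v ∈ (kv :: tl).map Prod.snd, k ∈ v := by
        intro k
        have hlen : ((kv :: tl).map Prod.snd).length = (kv :: tl).length := List.length_map ..
        constructor
        · intro h
          have : (F.count k : Int) = n := by simpa [hPdef] using h
          have hcnt : F.count k = (kv :: tl).length := by
            rw [hn] at this; exact_mod_cast this
          have := (List.countP_eq_length (p := fun v => decide (k ∈ v))
            (l := (kv :: tl).map Prod.snd)).mp (by rw [← hcount k, hcnt, hlen])
          intro v hv; simpa using this v hv
        · intro h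
          have : ((kv :: tl).map Prod.snd).countP (fun v => decide (k ∈ v))
              = ((kv :: tl).map Prod.snd).length :=
            List.countP_eq_length.mpr (by intro v hv; simpa using h v hv)
          have : F.count k = (kv :: tl).length := by rw [hcount k, this, hlen]
          simp [hPdef, this, hn]
      have hPmem : ∀ k, P k = true → k ∈ c0 := by
        intro k hk
        exact (hPiff k).mp hk c0 (by simp [hc0])
      -- whole ofList filter collapses onto c0
      have hFsplit : F = c0 ++ rest.flatten := by
        simp [hF, hc0, hrest]
      have hof : PySem.Set.ofList F = (rest.flatten).foldl PySem.Set.add c0 := by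
        rw [PySem.Set.ofList_eq_foldl, hFsplit, List.foldl_append,
          ← PySem.Set.ofList_eq_foldl, PySem.Set.ofList_eq_self_of_nodup c0 hc0nd]
      rw [hof, pv_filter_foldl_add P _ c0 hPmem]
      -- A side
      rw [pv_foldl_inter]
      apply List.filter_congr
      intro x hx
      have : (rest.all (fun c => PySem.Set.contains c x)) = true ↔ P x = true := by
        rw [hPiff x]
        simp only [List.all_eq_true, PySem.Set.contains_iff]
        constructor
        · intro h v hv
          rcases List.mem_map.mp hv with ⟨p, hp, rfl⟩
          rcases List.mem_cons.mp hp with hp | hp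
          · subst hp; exact hx
          · exact h p.2 (by rw [hrest]; exact List.mem_map_of_mem hp)
        · intro h c hc
          exact h c (by simp only [List.map_cons]; exact List.mem_cons_of_mem _ (hrest ▸ hc))
      cases hax : rest.all (fun c => PySem.Set.contains c x) with
      | true => exact (this.mp hax).symm
      | false =>
          cases hpx : P x with
          | false => rfl
          | true => exact absurd (this.mpr hpx) (by rw [hax]; simp)

-- ===== VERDICT (by name: the statement is the Claim_ definition above) =====
theorem empleados_que_trabajan_en_todos_los_dias_spec : Claim_equal_empleados_que_trabajan_en_todos_los_dias := by
  intro d _ hpre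
  unfold Spec_empleados_que_trabajan_en_todos_los_dias
  exact empleados_main d hpre
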